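-- pv_equiv track=rewrite | github.com/mayur75584/GeeksForGeeks | GeeksforGeeks/136(Bleak Numbers).py | is_bleak
-- ===== SOURCE A (Python) =====
-- def is_bleak(n):
--     for i in range(1,n+1):
--         x=i
--         z=bin(i).replace('0b','')
--         x1=z.count('1')
--         if int(x1)+x==n:
--             return 0
--     else:
--         return 1
-- ===== SOURCE B (Python) =====
-- def is_bleak(n):
--     # Only candidates i with i + popcount(i) == n can lie in [n-64, n]:
--     # popcount(i) <= 64 for any i <= n within the 32-bit domain.
--     def popcount(x):
--         c = 0
--         while x > 0:
--             c += x % 2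
--             x //= 2
--         return c
--     for i in range(max(1, n - 64), n + 1):
--         if i + popcount(i) == n:
--             return 0
--     return 1
-- ===== Notes on version B (the rewrite author's own statement) =====
-- stated objective: faster
-- what changed: Instead of scanning every i in [1,n] and counting '1' chars of bin(i), B scans only the constant-size window [max(1, n-64), n] (popcount cannot exceed 64 on the 32-bit domain) and computes popcount arithmetically.
import Mathlib
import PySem

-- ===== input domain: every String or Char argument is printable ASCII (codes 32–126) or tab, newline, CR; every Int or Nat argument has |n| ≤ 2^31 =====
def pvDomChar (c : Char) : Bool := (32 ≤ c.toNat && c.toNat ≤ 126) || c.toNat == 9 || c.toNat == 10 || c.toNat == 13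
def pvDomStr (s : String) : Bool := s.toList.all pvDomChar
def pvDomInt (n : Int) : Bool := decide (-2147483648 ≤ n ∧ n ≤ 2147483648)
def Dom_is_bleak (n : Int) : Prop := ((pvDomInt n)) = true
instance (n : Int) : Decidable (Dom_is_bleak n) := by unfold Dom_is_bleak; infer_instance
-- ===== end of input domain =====

-- B scans only the window [max(1, n-64), n] instead of all of [1, n]; on the 32-bit
-- domain popcount(i) ≤ 64, so every solution of i + popcount(i) = n lies in that window.

-- ===== PORT A =====
-- bin(i) without the '0b' prefix, as a list of chars (exact for i ≥ 0; A only calls it with i ≥ 1)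
def pyBinDigits : Nat → List Char
  | 0 => []
  | m+1 => pyBinDigits ((m+1)/2) ++ [if (m+1) % 2 = 1 then '1' else '0']
decreasing_by exact Nat.div_lt_self (Nat.succ_pos m) one_lt_two

def isBleakLoopA (n : Int) : List Int → Int
  | [] => 1                                            -- for … else: return 1
  | i :: rest =>
      let x := i
      let z := pyBinDigits i.toNat                     -- z = bin(i).replace('0b','')
      let x1 : Int := ((z.count '1' : Nat) : Int)      -- x1 = z.count('1'); int(x1) = x1
      if x1 + x = n then 0 else isBleakLoopA n rest

def is_bleak (n : Int) : Int := isBleakLoopA n (PySem.List.pyRange 1 (n+1) 1)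

-- ===== PORT B =====
-- 'while x > 0: c += x % 2; x //= 2' — exact for the nonnegative x this loop receives
def popAux : Nat → Nat
  | 0 => 0
  | m+1 => (m+1) % 2 + popAux ((m+1)/2)
decreasing_by exact Nat.div_lt_self (Nat.succ_pos m) one_lt_two

def popcountB (x : Int) : Int := (popAux x.toNat : Int)

def isBleakLoopB (n : Int) : List Int → Int
  | [] => 1
  | i :: rest => if i + popcountB i = n then 0 else isBleakLoopB n rest

def is_bleak_alt (n : Int) : Int :=
  isBleakLoopB n (PySem.List.pyRange (max 1 (n - 64)) (n + 1) 1)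

-- ===== PRECONDITION & SPEC =====
def Spec_is_bleak (n : Int) (out : Int) : Prop := out = is_bleak_alt n
instance (n : Int) (out : Int) : Decidable (Spec_is_bleak n out) := by unfold Spec_is_bleak; infer_instance

-- ===== CLAIM (what is proved, stated in full; the proofs are below) =====
def Claim_equal_is_bleak : Prop := ∀ (n : Int), Dom_is_bleak n → Spec_is_bleak n (is_bleak n)

-- ===== LEMMAS AND PROOFS =====

-- A's character count of bin(i) equals B's arithmetic popcount
theorem count_binDigits : ∀ k : Nat, (pyBinDigits k).count '1' = popAux k := by
  intro k
  induction k using Nat.strong_induction_on with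
  | _ k ih =>
    match k with
    | 0 => simp [pyBinDigits, popAux]
    | m+1 =>
      rw [pyBinDigits, popAux, List.count_append,
        ih ((m+1)/2) (Nat.div_lt_self (Nat.succ_pos m) one_lt_two)]
      rcases Nat.mod_two_eq_zero_or_one (m+1) with h | h
      · simp [h]
      · simp [h, Nat.add_comm]

theorem popAux_le : ∀ (j k : Nat), k < 2 ^ j → popAux k ≤ j := by
  intro j
  induction j with
  | zero => intro k hk; interval_cases k; simp [popAux]
  | succ j ih =>
    intro k hk
    match k with
    | 0 => simp [popAux]
    | m+1 =>
      rw [popAux]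
      have hdiv : (m+1)/2 < 2 ^ j := by
        have h2 : (m+1)/2 * 2 ≤ m+1 := Nat.div_mul_le_self _ _
        have h3 : 2 ^ (j+1) = 2 ^ j * 2 := by ring
        omega
      have := ih _ hdiv
      have := Nat.mod_lt m (y := 2) two_pos
      omega

theorem loopA_eq (n : Int) : ∀ l : List Int,
    isBleakLoopA n l = if ∃ i ∈ l, i + popcountB i = n then 0 else 1 := by
  intro l
  induction l with
  | nil => simp [isBleakLoopA]
  | cons i rest ih =>
    simp only [isBleakLoopA, count_binDigits]
    have hcomm : ((popAux i.toNat : Int) + i = n) ↔ (i + popcountB i = n) := by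
      unfold popcountB; constructor <;> intro h <;> omega
    by_cases h : i + popcountB i = n
    · rw [if_pos (hcomm.mpr h), if_pos ⟨i, List.mem_cons_self, h⟩]
    · rw [if_neg (fun hc => h (hcomm.mp hc)), ih]
      have hiff : (∃ j ∈ i :: rest, j + popcountB j = n) ↔ (∃ j ∈ rest, j + popcountB j = n) := by
        constructor
        · rintro ⟨j, hj, hpj⟩
          rcases List.mem_cons.mp hj with rfl | hj
          · exact absurd hpj h
          · exact ⟨j, hj, hpj⟩
        · rintro ⟨j, hj, hpj⟩
          exact ⟨j, List.mem_cons_of_mem _ hj, hpj⟩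
      simp only [hiff]

theorem loopB_eq (n : Int) : ∀ l : List Int,
    isBleakLoopB n l = if ∃ i ∈ l, i + popcountB i = n then 0 else 1 := by
  intro l
  induction l with
  | nil => simp [isBleakLoopB]
  | cons i rest ih =>
    rw [isBleakLoopB]
    by_cases h : i + popcountB i = n <;> simp [h, ih]

-- on the 32-bit domain, any solution in [1, n] already lies in [max 1 (n-64), n]
theorem exists_window (n : Int) (hn : n ≤ 2147483648) :
    (∃ i ∈ PySem.List.pyRange 1 (n+1) 1, i + popcountB i = n) ↔
    (∃ i ∈ PySem.List.pyRange (max 1 (n-64)) (n+1) 1, i + popcountB i = n) := by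
  constructor
  · rintro ⟨i, hm, hp⟩
    rw [PySem.List.mem_pyRange_one] at hm
    refine ⟨i, ?_, hp⟩
    rw [PySem.List.mem_pyRange_one]
    have hk : i.toNat < 2 ^ 64 := by
      have : (2:Int) ^ 64 = 18446744073709551616 := by norm_num
      omega
    have hpop : popAux i.toNat ≤ 64 := popAux_le 64 _ hk
    have : popcountB i ≤ 64 := by
      unfold popcountB; exact_mod_cast hpop
    have : 0 ≤ popcountB i := by
      unfold popcountB; positivity
    constructor
    · omega
    · exact hm.2
  · rintro ⟨i, hm, hp⟩
    rw [PySem.List.mem_pyRange_one] at hm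
    refine ⟨i, ?_, hp⟩
    rw [PySem.List.mem_pyRange_one]
    omega

-- ===== VERDICT (by name: the statement is the Claim_ definition above) =====
theorem is_bleak_spec : Claim_equal_is_bleak := by
  intro n hdom
  unfold Spec_is_bleak is_bleak is_bleak_alt
  have hn : n ≤ 2147483648 := by
    simp [Dom_is_bleak, pvDomInt] at hdom; omega
  rw [loopA_eq, loopB_eq]
  simp only [exists_window n hn]
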